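-- pv_equiv track=rewrite | github.com/sahil3Vedi/HackerRank-Hard | Maximize It/solution.py | formTuples
-- ===== SOURCE A (Python) =====
-- def productlist(alpha, beta):
--     list_products = []
--     for every_element in alpha:
--         for every_other_element in beta:
--             minilist = [every_element]
--             if isinstance(every_other_element, int):
--                 minilist.append(every_other_element)
--             else:
--                 minilist = minilist + every_other_element
--             list_products.append(minilist)
--     return list_products
--
-- def formTuples(klists):
--     number_of_lists = len(klists)
--     if number_of_lists == 1:
--         superlist = []
--         for each_number in klists[0]:
--             sublist = [each_number]
--             superlist.append(sublist)
--         return superlist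
--
--     elif number_of_lists == 2:
--         return productlist(klists[0], klists[1])
--     else:
--         temp = klists
--         return productlist(klists[0], formTuples(temp[1:]))
-- ===== SOURCE B (Python) =====
-- def formTuples(klists):
--     acc = [[x] for x in klists[0]]
--     for L in klists[1:]:
--         acc = [t + [y] for t in acc for y in L]
--     return acc
-- ===== Notes on version B (the rewrite author's own statement) =====
-- stated objective: simpler
-- what changed: Replaces the recursive right-fold through productlist by a single left-to-right loop that extends each partial tuple at its tail with comprehensions, eliminating both the recursion and the productlist helper.
import Mathlib
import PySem

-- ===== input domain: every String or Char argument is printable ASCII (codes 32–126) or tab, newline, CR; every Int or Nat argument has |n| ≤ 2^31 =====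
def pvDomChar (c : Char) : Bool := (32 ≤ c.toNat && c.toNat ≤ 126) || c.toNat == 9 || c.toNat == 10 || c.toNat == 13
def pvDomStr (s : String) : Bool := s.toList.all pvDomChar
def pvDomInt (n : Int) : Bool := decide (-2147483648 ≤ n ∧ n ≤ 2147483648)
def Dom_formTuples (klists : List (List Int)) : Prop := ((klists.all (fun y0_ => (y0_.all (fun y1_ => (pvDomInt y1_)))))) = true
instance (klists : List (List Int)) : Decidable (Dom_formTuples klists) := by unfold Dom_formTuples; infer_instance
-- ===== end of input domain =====

-- B replaces A's recursive right-fold through productlist by one left-to-right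
-- comprehension loop extending partial tuples at their tail (objective: simpler).


-- ===== PORT A =====
-- productlist(alpha, beta) where beta's elements are ints (the two-list case):
-- the isinstance check is true, so minilist = [x, y].
def productlistInt (alpha : List Int) (beta : List Int) : List (List Int) :=
  alpha.foldl (fun acc x => beta.foldl (fun acc2 y => acc2 ++ [[x, y]]) acc) []

-- productlist(alpha, beta) where beta's elements are lists (the recursive case):
-- the isinstance check is false, so minilist = [x] + t.
def productlistList (alpha : List Int) (beta : List (List Int)) : List (List Int) :=
  alpha.foldl (fun acc x => beta.foldl (fun acc2 t => acc2 ++ [x :: t]) acc) []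

def formTuples (klists : List (List Int)) : List (List Int) :=
  match klists with
  | [] => []                        -- Python raises IndexError here; excluded by Pre_
  | [l0] => l0.foldl (fun superlist x => superlist ++ [[x]]) []
  | [l0, l1] => productlistInt l0 l1
  | l0 :: rest => productlistList l0 (formTuples rest)

-- ===== PORT B =====
def formTuples_alt (klists : List (List Int)) : List (List Int) :=
  match klists with
  | [] => []                        -- Python raises IndexError here; excluded by Pre_
  | k0 :: rest =>
      rest.foldl (fun acc L => acc.flatMap (fun t => L.map (fun y => t ++ [y])))
        (k0.map (fun x => [x]))

-- ===== PRECONDITION & SPEC =====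
-- Pre_ excludes only the empty list, on which both Pythons raise IndexError.
def Pre_formTuples (klists : List (List Int)) : Prop := klists ≠ []
instance (klists : List (List Int)) : Decidable (Pre_formTuples klists) := by unfold Pre_formTuples; infer_instance
def pvWitness_formTuples : List (List Int) := [[1, 2], [3]]
def Spec_formTuples (klists : List (List Int)) (out : List (List Int)) : Prop := out = formTuples_alt klists
instance (klists : List (List Int)) (out : List (List Int)) : Decidable (Spec_formTuples klists out) := by unfold Spec_formTuples; infer_instance

-- ===== CLAIM (what is proved, stated in full; the proofs are below) =====
def Claim_equal_formTuples : Prop := ∀ (klists : List (List Int)), Dom_formTuples klists → Pre_formTuples klists → Spec_formTuples klists (formTuples klists)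

-- ===== LEMMAS AND PROOFS =====

-- canonical Cartesian product, used only by the proofs
def prodTuples (ls : List (List Int)) : List (List Int) :=
  match ls with
  | [] => [[]]
  | a :: r => a.flatMap (fun x => (prodTuples r).map (fun t => x :: t))

theorem flatten_map_single {A B : Type} (l : List A) (f : A -> B) :
    (l.map (fun x => [f x])).flatten = l.map f := by
  induction l with
  | nil => rfl
  | cons x t ih => simp [ih]

theorem nested_foldl {A B C : Type} (a : List A) (b : List B) (f : A -> B -> C)
    (init : List C) :
    a.foldl (fun acc x => b.foldl (fun acc2 y => acc2 ++ [f x y]) acc) init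
      = init ++ a.flatMap (fun x => b.map (f x)) := by
  induction a generalizing init with
  | nil => simp
  | cons x t ih => simp [List.foldl, List.flatMap, flatten_map_single]

theorem productlistInt_eq (a b : List Int) :
    productlistInt a b = a.flatMap (fun x => b.map (fun y => [x, y])) := by
  unfold productlistInt; rw [nested_foldl]; simp

theorem productlistList_eq (a : List Int) (bs : List (List Int)) :
    productlistList a bs = a.flatMap (fun x => bs.map (fun t => x :: t)) := by
  unfold productlistList; rw [nested_foldl]; simp

-- A computes the canonical product on every nonempty input
theorem formTuples_eq_prod (k0 : List Int) (rest : List (List Int)) :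
    formTuples (k0 :: rest) = prodTuples (k0 :: rest) := by
  induction rest generalizing k0 with
  | nil =>
      simp [formTuples, prodTuples, flatten_map_single, List.flatMap]
  | cons b r ih =>
      cases r with
      | nil =>
          simp [formTuples, prodTuples, productlistInt_eq, flatten_map_single,
            List.map_map, Function.comp_def, List.flatMap]
      | cons c r' =>
          show productlistList k0 (formTuples (b :: c :: r')) = _
          rw [ih b, productlistList_eq]
          rfl

-- B's left fold, characterised against the canonical product
theorem alt_fold_eq (rest : List (List Int)) (S : List (List Int)) :
    rest.foldl (fun acc L => acc.flatMap (fun t => L.map (fun y => t ++ [y]))) S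
      = S.flatMap (fun t => (prodTuples rest).map (fun u => t ++ u)) := by
  induction rest generalizing S with
  | nil => simp [prodTuples]
  | cons a r ih =>
      simp only [List.foldl, ih, prodTuples]
      simp [List.flatMap_assoc, List.flatMap_map, List.map_flatMap,
        List.map_map, Function.comp_def, List.append_assoc]

theorem formTuples_alt_eq_prod (k0 : List Int) (rest : List (List Int)) :
    formTuples_alt (k0 :: rest) = prodTuples (k0 :: rest) := by
  show rest.foldl _ (k0.map (fun x => [x])) = _
  rw [alt_fold_eq]
  simp [prodTuples, List.flatMap_map]

-- ===== VERDICT (by name: the statement is the Claim_ definition above) =====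
theorem formTuples_spec : Claim_equal_formTuples := by
  intro klists _ hpre
  unfold Spec_formTuples
  cases klists with
  | nil => exact absurd rfl hpre
  | cons k0 rest => rw [formTuples_eq_prod, formTuples_alt_eq_prod]
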